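-- pv_equiv track=rewrite | github.com/lucastsui/collatz-research | distinct_position_barrier.py | unrestricted_sumset
-- ===== SOURCE A (Python) =====
-- def unrestricted_sumset(p, k, D):
--     """
--     Compute the unrestricted sumset A_0 + A_1 + ... + A_{k-1} mod D,
--     where A_j = {3^{k-1-j} * 2^i mod D : i = 0, ..., p-1}.
--     (No distinct-position constraint.)
--     """
--     current = {0}
--     for j in range(k):
--         coeff = pow(3, k-1-j, D)
--         Aj = set()
--         for i in range(p):
--             Aj.add((coeff * pow(2, i, D)) % D)
--         new = set()
--         for s in current:
--             for a in Aj: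
--                 new.add((s + a) % D)
--         current = new
--     return current
-- ===== SOURCE B (Python) =====
-- def unrestricted_sumset(p, k, D):
--     """Horner-style computation of the iterated sumset mod D.
--
--     Since A_j = 3^(k-1-j) * A with the single base set A = {2^i mod D : i < p},
--     the sumset satisfies S_0 = {0}, S_j = 3*S_{j-1} + A (mod D), and the answer
--     is S_k.  So B builds A once by repeated doubling (no modular pow at all) and
--     folds the Horner recurrence; no per-round coefficients or geometric sets.
--     """
--     if k <= 0:
--         return {0}
--     pws = []
--     pw = 1 % D
--     for _ in range(p):
--         pws.append(pw)
--         pw = pw * 2 % D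
--     base = list(dict.fromkeys(pws))
--     current = [0]
--     for _ in range(k):
--         current = list(dict.fromkeys((3 * s + a) % D for s in current for a in base))
--     return set(current)
-- ===== Notes on version B (the rewrite author's own statement) =====
-- stated objective: alternative
-- what changed: B replaces A's per-round construction of the geometric set A_j = 3^(k-1-j)*{2^i mod D} (a modular pow per element, every round) by Horner's scheme: the base set A = {2^i mod D} is built once by repeated doubling and the loop folds the identity S <- 3*S + A (mod D), so B maintains the unscaled partial sumsets (A's scaled by 3^(j-k)) and performs no pow() calls or per-round coefficients at all.
import Mathlib
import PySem

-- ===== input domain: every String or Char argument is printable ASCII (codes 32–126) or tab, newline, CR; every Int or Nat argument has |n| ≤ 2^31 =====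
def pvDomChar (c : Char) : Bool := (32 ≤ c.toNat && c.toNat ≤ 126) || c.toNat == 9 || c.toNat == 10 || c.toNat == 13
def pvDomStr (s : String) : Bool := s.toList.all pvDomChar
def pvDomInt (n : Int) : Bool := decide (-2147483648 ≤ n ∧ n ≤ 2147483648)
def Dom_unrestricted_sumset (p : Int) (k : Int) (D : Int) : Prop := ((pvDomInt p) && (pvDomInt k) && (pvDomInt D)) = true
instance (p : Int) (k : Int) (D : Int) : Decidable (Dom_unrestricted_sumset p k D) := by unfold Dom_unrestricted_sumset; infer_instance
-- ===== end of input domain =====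

-- B computes the sumset by Horner's scheme S <- 3*S + A (mod D) over a single base set
-- A = {2^i mod D} built once by repeated doubling, instead of A's per-round geometric
-- sets 3^(k-1-j)*{2^i mod D} with a modular pow per element (objective: alternative).

-- ===== PORT A =====
def unrestricted_sumset (p : Int) (k : Int) (D : Int) : List Int :=
  (PySem.List.pyRange 0 k 1).foldl (fun current j =>
    let coeff := PySem.Int.powMod 3 (k - 1 - j).toNat D
    let Aj := (PySem.List.pyRange 0 p 1).foldl
      (fun Aj i => PySem.Set.add Aj (PySem.Int.mod (coeff * PySem.Int.powMod 2 i.toNat D) D))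
      PySem.Set.empty
    current.foldl (fun new s =>
      Aj.foldl (fun new a => PySem.Set.add new (PySem.Int.mod (s + a) D)) new)
      PySem.Set.empty) [0]

-- ===== PORT B =====
def unrestricted_sumset_alt (p : Int) (k : Int) (D : Int) : List Int :=
  if k ≤ 0 then [0]
  else
    let pws := ((PySem.List.pyRange 0 p 1).foldl
      (fun (st : List Int × Int) _ => (st.1 ++ [st.2], PySem.Int.mod (st.2 * 2) D))
      ([], PySem.Int.mod 1 D)).1
    let base := PySem.List.dedup pws
    let current := (PySem.List.pyRange 0 k 1).foldl (fun current _ =>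
      PySem.List.dedup (current.flatMap (fun s => base.map (fun a => PySem.Int.mod (3 * s + a) D)))) [0]
    PySem.Set.ofList current

-- ===== PRECONDITION & SPEC =====
-- Pre_ excludes D = 0 with k ≥ 1, where Python's pow(3, k-1-j, 0) raises ValueError (for k ≤ 0 no pow is evaluated).
def Pre_unrestricted_sumset (p : Int) (k : Int) (D : Int) : Prop := k ≤ 0 ∨ D ≠ 0
instance (p : Int) (k : Int) (D : Int) : Decidable (Pre_unrestricted_sumset p k D) := by unfold Pre_unrestricted_sumset; infer_instance
def pvWitness_unrestricted_sumset : Int × Int × Int := (3, 2, 10)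

def Spec_unrestricted_sumset (p : Int) (k : Int) (D : Int) (out : List Int) : Prop := out = unrestricted_sumset_alt p k D
instance (p : Int) (k : Int) (D : Int) (out : List Int) : Decidable (Spec_unrestricted_sumset p k D out) := by unfold Spec_unrestricted_sumset; infer_instance

-- ===== CLAIM (what is proved, stated in full; the proofs are below) =====
def Claim_equal_unrestricted_sumset : Prop := ∀ (p : Int) (k : Int) (D : Int), Dom_unrestricted_sumset p k D → Pre_unrestricted_sumset p k D → Spec_unrestricted_sumset p k D (unrestricted_sumset p k D)

-- ===== LEMMAS AND PROOFS =====

-- Python % (floor mod) absorbs an inner % in products and sums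
theorem pvFmodMulLeft (a b n : Int) : PySem.Int.mod (PySem.Int.mod a n * b) n = PySem.Int.mod (a * b) n := by
  show ((a.fmod n) * b).fmod n = (a * b).fmod n
  have h := Int.fmod_add_mul_fdiv a n
  have h1 : a.fmod n = a - n * a.fdiv n := by linarith
  rw [h1, show (a - n * a.fdiv n) * b = a * b + n * (-(a.fdiv n) * b) from by ring,
    Int.add_mul_fmod_self_left]

theorem pvFmodMulRight (a b n : Int) : PySem.Int.mod (a * PySem.Int.mod b n) n = PySem.Int.mod (a * b) n := by
  rw [mul_comm a, pvFmodMulLeft, mul_comm]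

theorem pvFmodAddRight (a b n : Int) : PySem.Int.mod (a + PySem.Int.mod b n) n = PySem.Int.mod (a + b) n := by
  show (a + b.fmod n).fmod n = (a + b).fmod n
  have h := Int.fmod_add_mul_fdiv b n
  have h1 : b.fmod n = b - n * b.fdiv n := by linarith
  rw [h1, show a + (b - n * b.fdiv n) = (a + b) + n * (-(b.fdiv n)) from by ring,
    Int.add_mul_fmod_self_left]

theorem pvFmodAdd (a b n : Int) : PySem.Int.mod (PySem.Int.mod a n + PySem.Int.mod b n) n = PySem.Int.mod (a + b) n := by
  rw [pvFmodAddRight, add_comm, pvFmodAddRight, add_comm]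

theorem pvFmodFmod (a n : Int) : PySem.Int.mod (PySem.Int.mod a n) n = PySem.Int.mod a n := by
  have := pvFmodMulLeft a 1 n
  simpa using this

-- pyRange 0 k 1 over any Int bound
theorem pvPyRange0 (k : Int) : PySem.List.pyRange 0 k 1 = List.map (fun t : Nat => (t : Int)) (List.range k.toNat) := by
  rcases le_or_gt 0 k with h | h
  · have h2 : k = ((k.toNat : Nat) : Int) := by omega
    nth_rewrite 1 [h2]
    rw [PySem.List.pyRange_zero_natCast]
  · have : k.toNat = 0 := by omega
    rw [this]
    have hk : ¬ (0 : Int) < k := by omega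
    simp [PySem.List.pyRange, hk]

-- membership only grows along a foldl of Set.add
theorem pvMemFoldlAdd (L : List Int) (S : PySem.Set Int) (x : Int) (h : x ∈ S ∨ x ∈ L) :
    x ∈ L.foldl PySem.Set.add S := by
  induction L generalizing S with
  | nil => simpa using h
  | cons y t ih =>
    refine ih (PySem.Set.add S y) ?_
    rcases h with h | h
    · left
      by_cases hm : y ∈ S <;> simp [PySem.Set.add, hm, h]
    · rcases List.mem_cons.1 h with rfl | h
      · left
        by_cases hm : x ∈ S <;> simp [PySem.Set.add, hm]
      · right; exact h

-- adding elements already present is a no-op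
theorem pvFoldlAddAbsorb (L : List Int) (S : PySem.Set Int) (h : ∀ y ∈ L, y ∈ S) :
    L.foldl PySem.Set.add S = S := by
  induction L with
  | nil => rfl
  | cons y t ih =>
    have hy : y ∈ S := h y (by simp)
    have ha : PySem.Set.add S y = S := by simp [PySem.Set.add, hy]
    rw [List.foldl_cons, ha]
    exact ih (fun z hz => h z (by simp [hz]))

theorem pvOfListSnoc (l : List Int) (x : Int) :
    PySem.Set.ofList (l ++ [x]) = PySem.Set.add (PySem.Set.ofList l) x := by
  simp [PySem.Set.ofList_eq_foldl, List.foldl_append]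

-- CORE: first-occurrence dedup of the outer list does not change the set built by a flatMap over it
theorem pvFoldFlatMapDedup (m : List Int) (g : Int → List Int) (acc : PySem.Set Int) :
    (((PySem.Set.ofList m : List Int).flatMap g).foldl PySem.Set.add acc)
      = ((m.flatMap g).foldl PySem.Set.add acc) := by
  induction m using List.reverseRecOn generalizing acc with
  | nil => rfl
  | append_singleton m x ih =>
    rw [pvOfListSnoc]
    by_cases hm : x ∈ (PySem.Set.ofList m : List Int)
    · have hxm : x ∈ m := (PySem.Set.mem_ofList m x).1 hm
      have ha : PySem.Set.add (PySem.Set.ofList m) x = PySem.Set.ofList m := by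
        simp [PySem.Set.add, hm]
      rw [ha, ih, List.flatMap_append, List.foldl_append]
      refine (pvFoldlAddAbsorb _ _ ?_).symm
      intro y hy
      have hy' : y ∈ m.flatMap g := by
        simp only [List.flatMap_cons, List.flatMap_nil, List.append_nil] at hy
        exact List.mem_flatMap.2 ⟨x, hxm, hy⟩
      exact pvMemFoldlAdd _ _ _ (Or.inr hy')
    · have ha : PySem.Set.add (PySem.Set.ofList m) x = (PySem.Set.ofList m : List Int) ++ [x] := by
        simp [PySem.Set.add, hm]
      rw [ha, List.flatMap_append, List.flatMap_append, List.foldl_append, List.foldl_append, ih]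

-- the same with a map instead of a flatMap
theorem pvFoldMapDedup (m : List Int) (φ : Int → Int) (acc : PySem.Set Int) :
    ((List.map φ (PySem.Set.ofList m : List Int)).foldl PySem.Set.add acc)
      = ((m.map φ).foldl PySem.Set.add acc) := by
  have h1 : ∀ l : List Int, l.map φ = l.flatMap (fun x => [φ x]) := by
    intro l
    induction l with
    | nil => rfl
    | cons a t ih => simp only [List.map_cons, List.flatMap_cons, ih]; rfl
  rw [h1, h1, pvFoldFlatMapDedup]

theorem pvOfListFlatMapDedup (m : List Int) (g : Int → List Int) :
    PySem.Set.ofList ((PySem.Set.ofList m : List Int).flatMap g) = PySem.Set.ofList (m.flatMap g) := by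
  conv_lhs => rw [PySem.Set.ofList_eq_foldl]
  conv_rhs => rw [PySem.Set.ofList_eq_foldl]
  exact pvFoldFlatMapDedup m g _

theorem pvOfListMapDedup (m : List Int) (φ : Int → Int) :
    PySem.Set.ofList (List.map φ (PySem.Set.ofList m : List Int)) = PySem.Set.ofList (m.map φ) := by
  conv_lhs => rw [PySem.Set.ofList_eq_foldl]
  conv_rhs => rw [PySem.Set.ofList_eq_foldl]
  exact pvFoldMapDedup m φ _

-- dedup of the INNER list of a flatMap-of-maps does not change the set either
theorem pvFoldFlatMapInnerDedup (l m : List Int) (h : Int → Int → Int) (acc : PySem.Set Int) :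
    ((l.flatMap (fun x => (PySem.Set.ofList m : List Int).map (h x))).foldl PySem.Set.add acc)
      = ((l.flatMap (fun x => m.map (h x))).foldl PySem.Set.add acc) := by
  induction l generalizing acc with
  | nil => rfl
  | cons x t ih =>
    rw [List.flatMap_cons, List.flatMap_cons, List.foldl_append, List.foldl_append,
      pvFoldMapDedup, ih]

theorem pvOfListFlatMapInnerDedup (l m : List Int) (h : Int → Int → Int) :
    PySem.Set.ofList (l.flatMap (fun x => (PySem.Set.ofList m : List Int).map (h x)))
      = PySem.Set.ofList (l.flatMap (fun x => m.map (h x))) := by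
  conv_lhs => rw [PySem.Set.ofList_eq_foldl]
  conv_rhs => rw [PySem.Set.ofList_eq_foldl]
  exact pvFoldFlatMapInnerDedup l m h _

-- and with an extra outer map around the flatMap
theorem pvFoldMapMapDedup (m : List Int) (ψ φ : Int → Int) (acc : PySem.Set Int) :
    ((List.map φ (List.map ψ (PySem.Set.ofList m : List Int))).foldl PySem.Set.add acc)
      = ((List.map φ (List.map ψ m)).foldl PySem.Set.add acc) := by
  rw [List.map_map, List.map_map, pvFoldMapDedup]

theorem pvFoldMapFlatMapInnerDedup (l m : List Int) (h : Int → Int → Int) (φ : Int → Int)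
    (acc : PySem.Set Int) :
    ((List.map φ (l.flatMap (fun x => (PySem.Set.ofList m : List Int).map (h x)))).foldl PySem.Set.add acc)
      = ((List.map φ (l.flatMap (fun x => m.map (h x)))).foldl PySem.Set.add acc) := by
  induction l generalizing acc with
  | nil => rfl
  | cons x t ih =>
    rw [List.flatMap_cons, List.flatMap_cons, List.map_append, List.map_append,
      List.foldl_append, List.foldl_append, pvFoldMapMapDedup, ih]

theorem pvOfListMapFlatMapInnerDedup (l m : List Int) (h : Int → Int → Int) (φ : Int → Int) :
    PySem.Set.ofList (List.map φ (l.flatMap (fun x => (PySem.Set.ofList m : List Int).map (h x))))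
      = PySem.Set.ofList (List.map φ (l.flatMap (fun x => m.map (h x)))) := by
  conv_lhs => rw [PySem.Set.ofList_eq_foldl]
  conv_rhs => rw [PySem.Set.ofList_eq_foldl]
  exact pvFoldMapFlatMapInnerDedup l m h φ _

-- foldl Set.add distributes over flatMap
theorem pvFoldlFlatMap (l : List Int) (f : Int → List Int) (acc : PySem.Set Int) :
    (l.flatMap f).foldl PySem.Set.add acc = l.foldl (fun a s => (f s).foldl PySem.Set.add a) acc := by
  induction l generalizing acc with
  | nil => rfl
  | cons x xs ih => rw [List.flatMap_cons, List.foldl_cons, List.foldl_append, ih]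

-- A's nested sumset loop = the deduplicated flat comprehension
theorem pvStepEq (D : Int) (Aj current : List Int) :
    current.foldl (fun new s =>
        Aj.foldl (fun new a => PySem.Set.add new (PySem.Int.mod (s + a) D)) new)
      PySem.Set.empty
    = PySem.Set.ofList (current.flatMap (fun s => Aj.map (fun a => PySem.Int.mod (s + a) D))) := by
  rw [PySem.Set.ofList_eq_foldl, pvFoldlFlatMap]
  apply PySem.List.foldl_congr_mem
  intro a s _
  rw [List.foldl_map]

-- the powers of two that B maintains incrementally
def pvGeo (D : Int) : Nat → Int
  | 0 => PySem.Int.mod 1 D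
  | t + 1 => PySem.Int.mod (pvGeo D t * 2) D

theorem pvGeoEq (D : Int) (t : Nat) : pvGeo D t = PySem.Int.mod (2 ^ t) D := by
  induction t with
  | zero => simp [pvGeo]
  | succ t ih => rw [pvGeo, ih, pvFmodMulLeft, pow_succ]

def pvBase (p D : Int) : List Int :=
  PySem.Set.ofList ((List.range p.toNat).map (pvGeo D))

-- one Horner round of B, and the iterated rounds
def pvBstep (base : List Int) (D : Int) (current : List Int) : List Int :=
  PySem.List.dedup (current.flatMap (fun s => base.map (fun a => PySem.Int.mod (3 * s + a) D)))

def pvB (base : List Int) (D : Int) : Nat → List Int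
  | 0 => [0]
  | n + 1 => pvBstep base D (pvB base D n)

-- one round of A (definitional repackaging of A's loop body)
def pvAstep (p k D : Int) (current : PySem.Set Int) (j : Int) : PySem.Set Int :=
  current.foldl (fun new s =>
    ((PySem.List.pyRange 0 p 1).foldl
      (fun Aj i => PySem.Set.add Aj (PySem.Int.mod (PySem.Int.powMod 3 (k - 1 - j).toNat D * PySem.Int.powMod 2 i.toNat D) D))
      PySem.Set.empty).foldl
      (fun new a => PySem.Set.add new (PySem.Int.mod (s + a) D)) new)
    PySem.Set.empty

theorem pvAeq (p k D : Int) :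
    unrestricted_sumset p k D = (PySem.List.pyRange 0 k 1).foldl (pvAstep p k D) [0] := rfl

-- B's incremental power loop produces the mapped pvGeo sequence
theorem pvPwsFold (D : Int) (l : List Int) (t : Nat) :
    (l.foldl (fun (st : List Int × Int) _ => (st.1 ++ [st.2], PySem.Int.mod (st.2 * 2) D))
      ((List.range t).map (pvGeo D), pvGeo D t)).1 = (List.range (t + l.length)).map (pvGeo D) := by
  induction l generalizing t with
  | nil => simp
  | cons x xs ih =>
    simp only [List.foldl_cons, List.length_cons]
    have e1 : (List.range t).map (pvGeo D) ++ [pvGeo D t] = (List.range (t + 1)).map (pvGeo D) := by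
      rw [List.range_succ, List.map_append]; rfl
    have e2 : PySem.Int.mod (pvGeo D t * 2) D = pvGeo D (t + 1) := rfl
    rw [e1, e2, ih (t + 1)]
    have : t + 1 + xs.length = t + (xs.length + 1) := by omega
    rw [this]

theorem pvBaseEq (p D : Int) :
    PySem.List.dedup (((PySem.List.pyRange 0 p 1).foldl
      (fun (st : List Int × Int) _ => (st.1 ++ [st.2], PySem.Int.mod (st.2 * 2) D))
      ([], PySem.Int.mod 1 D)).1) = pvBase p D := by
  have h0 : (([] : List Int), PySem.Int.mod 1 D) = ((List.range 0).map (pvGeo D), pvGeo D 0) := rfl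
  rw [h0, pvPwsFold]
  have hl : (PySem.List.pyRange 0 p 1).length = p.toNat := by rw [pvPyRange0]; simp
  rw [hl, Nat.zero_add, PySem.List.dedup_eq_ofList]
  rfl

-- the iterated B rounds, as a fold over any index list
theorem pvBfold {α : Type} (base : List Int) (D : Int) (l : List α) :
    l.foldl (fun c _ => pvBstep base D c) [0] = pvB base D l.length := by
  induction l using List.reverseRecOn with
  | nil => rfl
  | append_singleton l x ih =>
    rw [List.foldl_append, List.foldl_cons, List.foldl_nil, ih, List.length_append]
    rfl

-- A's inner geometric-set loop, in closed list form
theorem pvAjEq (coeff D p : Int) :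
    (PySem.List.pyRange 0 p 1).foldl
      (fun Aj i => PySem.Set.add Aj (PySem.Int.mod (coeff * PySem.Int.powMod 2 i.toNat D) D))
      PySem.Set.empty
    = PySem.Set.ofList ((List.range p.toNat).map
        (fun t => PySem.Int.mod (coeff * PySem.Int.mod (2 ^ t) D) D)) := by
  rw [pvPyRange0, List.foldl_map, PySem.Set.ofList_eq_foldl, List.foldl_map]
  apply PySem.List.foldl_congr_mem
  intro a t _
  rw [Int.toNat_natCast]
  rfl

-- the scaling that relates A's intermediate sets to B's
def pvPhi (e : Nat) (D x : Int) : Int := PySem.Int.mod (3 ^ e * x) D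

-- the elementwise identity behind one round
theorem pvValEq (k : Int) (n t : Nat) (hkn : n + 1 ≤ k.toNat) (D x : Int) :
    PySem.Int.mod (pvPhi (k.toNat - n) D x
        + PySem.Int.mod (PySem.Int.powMod 3 (k - 1 - (n : Int)).toNat D * PySem.Int.mod (2 ^ t) D) D) D
      = pvPhi (k.toNat - (n + 1)) D (PySem.Int.mod (3 * x + pvGeo D t) D) := by
  have he : (k - 1 - (n : Int)).toNat = k.toNat - 1 - n := by omega
  have hp : PySem.Int.powMod 3 (k.toNat - 1 - n) D = PySem.Int.mod (3 ^ (k.toNat - 1 - n)) D := rfl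
  rw [he, hp, pvFmodMulLeft, pvFmodMulRight]
  unfold pvPhi
  rw [pvFmodAdd, pvGeoEq, pvFmodAddRight, pvFmodMulRight]
  have h1 : k.toNat - (n + 1) = k.toNat - 1 - n := by omega
  have h2 : k.toNat - n = (k.toNat - 1 - n) + 1 := by omega
  rw [h1, h2]
  congr 1
  ring

-- MAIN INVARIANT: after n rounds, A's set is B's set scaled by 3^(k-n), as first-occurrence lists
theorem pvInv (p k D : Int) (n : Nat) (hn : (n : Int) ≤ k) :
    ((List.range n).map (fun t : Nat => (t : Int))).foldl (pvAstep p k D) [0]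
      = PySem.Set.ofList ((pvB (pvBase p D) D n).map (pvPhi (k.toNat - n) D)) := by
  induction n with
  | zero =>
    have h0 : pvPhi (k.toNat - 0) D 0 = 0 := by
      unfold pvPhi; rw [mul_zero]; exact Int.zero_fmod D
    simp only [List.range_zero, List.map_nil, List.foldl_nil, pvB, List.map_cons, List.map_nil, h0]
    rfl
  | succ n ih =>
    have hn' : (n : Int) ≤ k := by push_cast at hn; omega
    have hkn : n + 1 ≤ k.toNat := by omega
    rw [List.range_succ, List.map_append, List.foldl_append, ih hn']
    simp only [List.map_cons, List.map_nil, List.foldl_cons, List.foldl_nil]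
    unfold pvAstep
    rw [pvAjEq, pvStepEq, pvOfListFlatMapDedup, List.flatMap_map]
    rw [pvOfListFlatMapInnerDedup (pvB (pvBase p D) D n)
      ((List.range p.toNat).map (fun t => PySem.Int.mod
        (PySem.Int.powMod 3 (k - 1 - (n : Int)).toNat D * PySem.Int.mod (2 ^ t) D) D))
      (fun x a => PySem.Int.mod (pvPhi (k.toNat - n) D x + a) D)]
    show _ = PySem.Set.ofList
      ((pvBstep (pvBase p D) D (pvB (pvBase p D) D n)).map (pvPhi (k.toNat - (n + 1)) D))
    unfold pvBstep
    rw [PySem.List.dedup_eq_ofList, pvOfListMapDedup]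
    conv_rhs => rw [show pvBase p D = PySem.Set.ofList ((List.range p.toNat).map (pvGeo D)) from rfl]
    rw [pvOfListMapFlatMapInnerDedup
      (pvB (PySem.Set.ofList ((List.range p.toNat).map (pvGeo D))) D n)
      ((List.range p.toNat).map (pvGeo D))
      (fun x a => PySem.Int.mod (3 * x + a) D) (pvPhi (k.toNat - (n + 1)) D)]
    rw [List.map_flatMap]
    have hF : (fun x => ((List.range p.toNat).map (fun t => PySem.Int.mod
          (PySem.Int.powMod 3 (k - 1 - (n : Int)).toNat D * PySem.Int.mod (2 ^ t) D) D)).map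
          (fun a => PySem.Int.mod (pvPhi (k.toNat - n) D x + a) D))
        = (fun x => (((List.range p.toNat).map (pvGeo D)).map
          (fun a => PySem.Int.mod (3 * x + a) D)).map (pvPhi (k.toNat - (n + 1)) D)) := by
      funext x
      rw [List.map_map, List.map_map, List.map_map]
      refine List.map_congr_left ?_
      intro t _
      exact pvValEq k n t hkn D x
    rw [hF]
    rfl

-- B's port, reduced to the iterated rounds
theorem pvAltEq (p k D : Int) (hk : ¬ k ≤ 0) :
    unrestricted_sumset_alt p k D = PySem.Set.ofList (pvB (pvBase p D) D k.toNat) := by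
  unfold unrestricted_sumset_alt
  rw [if_neg hk]
  show PySem.Set.ofList ((PySem.List.pyRange 0 k 1).foldl (fun current _ =>
      PySem.List.dedup (current.flatMap (fun s =>
        (PySem.List.dedup (((PySem.List.pyRange 0 p 1).foldl
          (fun (st : List Int × Int) _ => (st.1 ++ [st.2], PySem.Int.mod (st.2 * 2) D))
          ([], PySem.Int.mod 1 D)).1)).map (fun a => PySem.Int.mod (3 * s + a) D)))) [0]) = _
  rw [pvBaseEq]
  have hfun : (fun (current : List Int) (_ : Int) =>
      PySem.List.dedup (current.flatMap (fun s =>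
        (pvBase p D).map (fun a => PySem.Int.mod (3 * s + a) D))))
      = fun c _ => pvBstep (pvBase p D) D c := rfl
  have hl : (PySem.List.pyRange 0 k 1).length = k.toNat := by rw [pvPyRange0]; simp
  rw [hfun, pvBfold, hl]

-- ===== VERDICT (by name: the statement is the Claim_ definition above) =====
theorem unrestricted_sumset_spec : Claim_equal_unrestricted_sumset := by
  intro p k D _ _
  unfold Spec_unrestricted_sumset
  by_cases hk : k ≤ 0
  · have hz : k.toNat = 0 := by omega
    rw [pvAeq, pvPyRange0, hz]
    unfold unrestricted_sumset_alt
    rw [if_pos hk]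
    rfl
  · rw [pvAeq, pvPyRange0, pvInv p k D k.toNat (by omega), pvAltEq p k D hk, Nat.sub_self]
    congr 1
    obtain ⟨m, hm⟩ : ∃ m, k.toNat = m + 1 := ⟨k.toNat - 1, by omega⟩
    rw [hm]
    have hfix : ∀ x ∈ pvB (pvBase p D) D (m + 1), pvPhi 0 D x = id x := by
      intro x hx
      have hx' : x ∈ (pvB (pvBase p D) D m).flatMap
          (fun s => (pvBase p D).map (fun a => PySem.Int.mod (3 * s + a) D)) := by
        simp only [pvB, pvBstep] at hx
        exact (PySem.List.mem_dedup _ _).1 hx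
      obtain ⟨s, _, hxs⟩ := List.mem_flatMap.1 hx'
      obtain ⟨a, _, rfl⟩ := List.mem_map.1 hxs
      show PySem.Int.mod (3 ^ 0 * PySem.Int.mod (3 * s + a) D) D = _
      rw [pow_zero, one_mul, pvFmodFmod]
      rfl
    calc (pvB (pvBase p D) D (m + 1)).map (pvPhi 0 D)
        = (pvB (pvBase p D) D (m + 1)).map id := List.map_congr_left hfix
      _ = pvB (pvBase p D) D (m + 1) := List.map_id _
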